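-- pv_equiv track=rewrite | github.com/isogeny-primes/isogeny-primes | sage_code/common_utils.py | get_eps_type
-- ===== SOURCE A (Python) =====
-- def get_eps_type(eps):
--     """Returns the type of an epsilon (quadratic, quartic, sextic), where
--     an epsilon is considered as a tuple
--     """
--
--     if 6 in eps:
--         if any(t in eps for t in [4, 8]):
--             return "mixed"
--         if len(set(eps)) == 1:
--             # means it's all 6s
--             return "type-2"
--         return "quartic-non-constant"
--     if any(t in eps for t in [4, 8]):
--         if len(set(eps)) == 1:
--             # means it's all 4s or all 8s
--             return "sextic-constant"
--         return "sextic-non-constant"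
--     if len(set(eps)) == 1:
--         return "type-1"
--     return "quadratic-non-constant"
-- ===== SOURCE B (Python) =====
-- def get_eps_type(eps):
--     # Single left-to-right state machine: a 2-bit family mask (bit 1 = saw 6,
--     # bit 2 = saw 4 or 8) and a running constancy flag, then name composition.
--     fam = 0
--     const = bool(eps)
--     prev = None
--     for x in eps:
--         if x == 6:
--             fam |= 1
--         elif x == 4 or x == 8:
--             fam |= 2
--         if prev is not None and x != prev:
--             const = False
--         prev = x
--     if fam == 3:
--         return "mixed"
--     base = ("quadratic", "quartic", "sextic")[fam]
--     if not const:
--         return base + "-non-constant"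
--     return {"quartic": "type-2", "quadratic": "type-1", "sextic": "sextic-constant"}[base]
-- ===== Notes on version B (the rewrite author's own statement) =====
-- stated objective: alternative
-- what changed: Replaced A's three separate membership/set passes and nested if-cascade by one left-to-right scan maintaining a 2-bit family mask and an adjacent-equality constancy flag, with the final name composed from the family base name and a constant/non-constant suffix.
import Mathlib
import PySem

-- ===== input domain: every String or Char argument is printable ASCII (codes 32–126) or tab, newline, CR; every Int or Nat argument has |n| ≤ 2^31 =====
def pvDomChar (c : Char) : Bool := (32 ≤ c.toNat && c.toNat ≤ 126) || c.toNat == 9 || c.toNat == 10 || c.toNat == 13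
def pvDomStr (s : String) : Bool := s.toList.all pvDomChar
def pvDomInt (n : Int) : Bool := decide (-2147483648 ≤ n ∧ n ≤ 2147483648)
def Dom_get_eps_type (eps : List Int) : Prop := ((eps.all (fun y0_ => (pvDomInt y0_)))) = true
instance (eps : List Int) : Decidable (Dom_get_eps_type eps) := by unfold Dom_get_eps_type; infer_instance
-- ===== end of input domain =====

-- B replaces A's separate membership/set passes and nested if-cascade by one single-pass
-- state machine (2-bit family mask + adjacent-equality constancy flag) and name composition.
-- ===== PORT A =====
def get_eps_type (eps : List Int) : String :=
  if eps.contains 6 then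
    if [(4 : Int), 8].any (fun t => eps.contains t) then "mixed"
    else if PySem.Set.len (PySem.Set.ofList eps) == 1 then "type-2"
    else "quartic-non-constant"
  else if [(4 : Int), 8].any (fun t => eps.contains t) then
    if PySem.Set.len (PySem.Set.ofList eps) == 1 then "sextic-constant"
    else "sextic-non-constant"
  else if PySem.Set.len (PySem.Set.ofList eps) == 1 then "type-1"
  else "quadratic-non-constant"

-- ===== PORT B =====
-- the for-loop of Source B: state (fam, prev, const), one step per element
def pvEpsScan : List Int → Int → Option Int → Bool → Int × Bool
  | [], fam, _, const => (fam, const)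
  | x :: rest, fam, prev, const =>
      let fam' := if x == 6 then Int.lor fam 1 else if x == 4 || x == 8 then Int.lor fam 2 else fam
      let const' := match prev with
        | some p => if x != p then false else const
        | none => const
      pvEpsScan rest fam' (some x) const'

def get_eps_type_alt (eps : List Int) : String :=
  let s := pvEpsScan eps 0 none (!eps.isEmpty)   -- const starts as bool(eps)
  let fam := s.1
  let const := s.2
  if fam == 3 then "mixed"
  else
    -- tuple indexing; fam ∈ {0,1,2} here so Python never raises: getD is unreachable
    let base := (PySem.List.pyGet? ["quadratic", "quartic", "sextic"] fam).getD ""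
    if !const then base ++ "-non-constant"
    else PySem.Dict.getD
      (PySem.Dict.ofList [("quartic", "type-2"), ("quadratic", "type-1"), ("sextic", "sextic-constant")])
      base ""

-- ===== PRECONDITION & SPEC =====
def Spec_get_eps_type (eps : List Int) (out : String) : Prop := out = get_eps_type_alt eps
instance (eps : List Int) (out : String) : Decidable (Spec_get_eps_type eps out) := by unfold Spec_get_eps_type; infer_instance

-- ===== CLAIM (what is proved, stated in full; the proofs are below) =====
def Claim_equal_get_eps_type : Prop := ∀ (eps : List Int), Dom_get_eps_type eps → Spec_get_eps_type eps (get_eps_type eps)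

-- ===== LEMMAS AND PROOFS =====
-- the family mask as a function of its two bits
def pvFamVal (b1 b2 : Bool) : Int := (if b1 then 1 else 0) + (if b2 then 2 else 0)

theorem pvFamVal_or1 (b1 b2 : Bool) : Int.lor (pvFamVal b1 b2) 1 = pvFamVal true b2 := by
  cases b1 <;> cases b2 <;> decide

theorem pvFamVal_or2 (b1 b2 : Bool) : Int.lor (pvFamVal b1 b2) 2 = pvFamVal b1 true := by
  cases b1 <;> cases b2 <;> decide

theorem pvEpsScan_fst (eps : List Int) : ∀ (b1 b2 : Bool) (prev : Option Int) (const : Bool),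
    (pvEpsScan eps (pvFamVal b1 b2) prev const).1 =
      pvFamVal (b1 || eps.contains 6) (b2 || eps.any (fun x => !(x == 6) && (x == 4 || x == 8))) := by
  induction eps with
  | nil => intro b1 b2 prev const; simp [pvEpsScan]
  | cons x r ih =>
    intro b1 b2 prev const
    simp only [pvEpsScan, List.contains_cons, List.any_cons]
    by_cases h6 : x = 6
    · subst h6
      rw [if_pos (by decide : ((6:Int) == 6) = true), pvFamVal_or1, ih]
      simp
    · have hx6 : (x == (6:Int)) = false := by simp [h6]
      have h6x : ((6:Int) == x) = false := by simp [Ne.symm h6]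
      by_cases h48 : x = 4 ∨ x = 8
      · have hx48 : (x == (4:Int) || x == 8) = true := by
          rcases h48 with h | h <;> simp [h]
        rw [if_neg (by simp [hx6]), if_pos hx48, pvFamVal_or2, ih]
        simp [h6x, hx48, hx6]
      · have hx48 : (x == (4:Int) || x == 8) = false := by
          simp only [Bool.or_eq_false_iff, beq_eq_false_iff_ne]
          exact ⟨fun h => h48 (Or.inl h), fun h => h48 (Or.inr h)⟩
        rw [if_neg (by simp [hx6]), if_neg (by simp [hx48]), ih]
        simp [h6x, hx48, hx6]

-- Python's running constancy check: every element equals its predecessor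
def pvAllEq : Option Int → List Int → Bool
  | _, [] => true
  | none, x :: r => pvAllEq (some x) r
  | some p, x :: r => (x == p) && pvAllEq (some x) r

theorem pvEpsScan_snd (eps : List Int) : ∀ (fam : Int) (prev : Option Int) (const : Bool),
    (pvEpsScan eps fam prev const).2 = (const && pvAllEq prev eps) := by
  induction eps with
  | nil => intro fam prev const; cases prev <;> simp [pvEpsScan, pvAllEq]
  | cons x r ih =>
    intro fam prev const
    cases prev with
    | none => simp only [pvEpsScan, pvAllEq, ih]
    | some p =>
      simp only [pvEpsScan, pvAllEq, ih]
      by_cases h : x = p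
      · simp [h]
      · simp [h, bne_iff_ne, Ne.symm]

theorem pvAllEq_some (r : List Int) : ∀ p, pvAllEq (some p) r = r.all (fun y => y == p) := by
  induction r with
  | nil => intro p; rfl
  | cons x r ih =>
    intro p
    simp only [pvAllEq, List.all_cons, ih]
    by_cases h : x = p
    · subst h
      simp
    · have hb : (x == p) = false := by simp [h]
      simp [hb]

theorem pv_len_add_ge (r : List Int) : ∀ s : PySem.Set Int,
    s.length ≤ (r.foldl PySem.Set.add s).length := by
  induction r with
  | nil => intro s; simp
  | cons x r ih =>
    intro s
    refine le_trans ?_ (ih (PySem.Set.add s x))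
    unfold PySem.Set.add
    split <;> simp

theorem pv_foldl_len_one (r : List Int) : ∀ (x : Int),
    (PySem.Set.len (r.foldl PySem.Set.add [x]) == 1) = r.all (fun y => y == x) := by
  induction r with
  | nil => intro x; simp [PySem.Set.len]
  | cons y r ih =>
    intro x
    simp only [List.foldl_cons, List.all_cons]
    by_cases h : y = x
    · have hadd : PySem.Set.add [x] y = [x] := by
        unfold PySem.Set.add; simp [h]
      rw [hadd, ih x]
      simp [h]
    · have hadd : PySem.Set.add [x] y = [x, y] := by
        unfold PySem.Set.add; simp [h]
      rw [hadd]
      have h2 : (2:ℕ) ≤ (r.foldl PySem.Set.add [x, y]).length := pv_len_add_ge r [x, y]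
      have hbeq : (PySem.Set.len (r.foldl PySem.Set.add [x, y]) == 1) = false := by
        unfold PySem.Set.len
        simp only [beq_eq_false_iff_ne]
        intro hc
        omega
      have hyx : (y == x) = false := by simp [h]
      rw [hbeq, hyx]
      simp

theorem pv_set_len_one (x : Int) (r : List Int) :
    (PySem.Set.len (PySem.Set.ofList (x :: r)) == 1) = r.all (fun y => y == x) := by
  have hof : PySem.Set.ofList (x :: r) = r.foldl PySem.Set.add [x] := by
    rw [PySem.Set.ofList_eq_foldl, List.foldl_cons]; rfl
  rw [hof, pv_foldl_len_one]

-- (x::r) contains 4 or 8 iff some element ≠ 6 is 4 or 8 (elements 4,8 are never 6)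
theorem pv_contains48 (l : List Int) :
    (l.contains 4 || l.contains 8) = (l.any (fun y => !(y == 6) && (y == 4 || y == 8))) := by
  induction l with
  | nil => rfl
  | cons z l ihl =>
    simp only [List.contains_cons, List.any_cons, Bool.or_assoc]
    by_cases hz6 : z = 6
    · subst hz6; simp [← ihl]
    · by_cases hz4 : z = 4
      · subst hz4; simp [← ihl]
      · by_cases hz8 : z = 8
        · subst hz8
          have h46 : ((4:Int) == 8) = false := by decide
          simp only [← ihl, h46]
          cases l.contains (4:Int) <;> cases l.contains (8:Int) <;> simp
        · have e4 : ((4:Int) == z) = false := by simp [Ne.symm hz4]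
          have e8 : ((8:Int) == z) = false := by simp [Ne.symm hz8]
          have f4 : (z == (4:Int)) = false := by simp [hz4]
          have f8 : (z == (8:Int)) = false := by simp [hz8]
          simp [← ihl, e4, e8, f4, f8]

-- ===== VERDICT (by name: the statement is the Claim_ definition above) =====
theorem get_eps_type_spec : Claim_equal_get_eps_type := by
  intro eps _
  unfold Spec_get_eps_type get_eps_type get_eps_type_alt
  cases eps with
  | nil => decide
  | cons x r =>
    have hfst := pvEpsScan_fst (x :: r) false false none (!(x :: r).isEmpty)
    have hsnd := pvEpsScan_snd (x :: r) (pvFamVal false false) none (!(x :: r).isEmpty)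
    have h0 : pvFamVal false false = 0 := rfl
    rw [h0] at hfst hsnd
    have hall : pvAllEq none (x :: r) = r.all (fun y => y == x) := by
      simp [pvAllEq, pvAllEq_some]
    rw [hall] at hsnd
    simp only [List.isEmpty_cons, Bool.not_false, Bool.true_and, Bool.false_or] at hfst hsnd ⊢
    rw [← pv_contains48] at hfst
    simp only [hfst, hsnd, pv_set_len_one, List.any_cons, List.any_nil, Bool.or_false]
    cases hc6 : (x :: r).contains 6 <;>
      cases hc4 : (x :: r).contains 4 <;>
      cases hc8 : (x :: r).contains 8 <;>
      cases hcc : r.all (fun y => y == x) <;>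
      simp [pvFamVal, PySem.List.pyGet?, PySem.List.pyIdx?] <;> rfl
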